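-- pv_equiv track=rewrite | github.com/isaquetdiniz/algoritmos-2021-2 | provas/1/q2.py | multiplicaMatrizesContadorInstrucoes
-- ===== SOURCE A (Python) =====
-- def multiplicaMatrizesContadorInstrucoes(matriz1, matriz2):
--     quantidade_instrucoes = 0
--
--     matriz_resultante = []
--     quantidade_instrucoes += 1
--
--     for i in range(len(matriz1)):
--         linha_resultante = []
--         quantidade_instrucoes += 1
--
--         for j in range(len(matriz1[i])):
--             resultado = matriz1[i][j] * matriz2[i][j]
--             quantidade_instrucoes += 1
--
--             linha_resultante.append(resultado)
--             quantidade_instrucoes += 1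
--
--         matriz_resultante.append(linha_resultante)
--         quantidade_instrucoes += 1
--
--     return quantidade_instrucoes
-- ===== SOURCE B (Python) =====
-- def multiplicaMatrizesContadorInstrucoes(matriz1, matriz2):
--     return 1 + sum(2 + 2 * len(row) for row in matriz1)
-- ===== Notes on version B (the rewrite author's own statement) =====
-- stated objective: faster
-- what changed: Replaced the nested counting loops (which also build the unused product matrix) by the closed form 1 + sum(2 + 2*len(row) for row in matriz1), one pass over the rows.
import Mathlib
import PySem

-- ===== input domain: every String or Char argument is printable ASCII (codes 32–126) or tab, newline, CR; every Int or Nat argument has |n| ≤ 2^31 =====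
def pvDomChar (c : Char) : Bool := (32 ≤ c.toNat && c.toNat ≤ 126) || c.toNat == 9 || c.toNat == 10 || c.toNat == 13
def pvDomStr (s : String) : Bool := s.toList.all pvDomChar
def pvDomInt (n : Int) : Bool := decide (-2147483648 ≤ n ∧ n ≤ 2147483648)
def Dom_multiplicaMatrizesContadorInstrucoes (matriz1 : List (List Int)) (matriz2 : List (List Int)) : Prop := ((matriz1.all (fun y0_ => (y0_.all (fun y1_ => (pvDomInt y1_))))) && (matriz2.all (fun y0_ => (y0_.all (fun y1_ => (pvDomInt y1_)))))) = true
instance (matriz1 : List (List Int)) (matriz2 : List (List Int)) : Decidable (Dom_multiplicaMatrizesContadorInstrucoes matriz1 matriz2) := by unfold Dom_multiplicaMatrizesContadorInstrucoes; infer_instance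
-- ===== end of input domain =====

-- ===== PORT A =====
-- Literal port of A: nested index loops that build the (unused) product matrix while
-- counting instructions. pyGetD stands in for indexing; Pre_ excludes the inputs
-- where Python's indexing would raise IndexError.
def multiplicaMatrizesContadorInstrucoes (matriz1 : List (List Int)) (matriz2 : List (List Int)) : Int :=
  let r :=
    (PySem.List.pyRange 0 (matriz1.length : Int) 1).foldl
      (fun (s : List (List Int) × Int) i =>
        let row1 := PySem.List.pyGetD matriz1 i []
        let row2 := PySem.List.pyGetD matriz2 i []
        let inner :=
          (PySem.List.pyRange 0 (row1.length : Int) 1).foldl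
            (fun (t : List Int × Int) j =>
              let resultado := PySem.List.pyGetD row1 j 0 * PySem.List.pyGetD row2 j 0
              (t.1 ++ [resultado], t.2 + 1 + 1))
            ([], s.2 + 1)
        (s.1 ++ [inner.1], inner.2 + 1))
      ([], 1)
  r.2

-- ===== PORT B =====
-- Closed form: 1 + sum over rows of (2 + 2*len(row)).
def multiplicaMatrizesContadorInstrucoes_alt (matriz1 : List (List Int)) (_matriz2 : List (List Int)) : Int :=
  1 + (matriz1.map (fun row => 2 + 2 * (row.length : Int))).sum

-- ===== PRECONDITION & SPEC =====
-- Pre_ excludes exactly the inputs where A raises IndexError: some row of matriz1 is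
-- longer than the corresponding row of matriz2 (a missing row counts as empty).
def Pre_multiplicaMatrizesContadorInstrucoes (matriz1 : List (List Int)) (matriz2 : List (List Int)) : Prop :=
  ∀ i ∈ List.range matriz1.length, (matriz1.getD i []).length ≤ (matriz2.getD i []).length
instance (matriz1 : List (List Int)) (matriz2 : List (List Int)) : Decidable (Pre_multiplicaMatrizesContadorInstrucoes matriz1 matriz2) := by unfold Pre_multiplicaMatrizesContadorInstrucoes; infer_instance
def pvWitness_multiplicaMatrizesContadorInstrucoes : List (List Int) × List (List Int) := ([[1, 2], [3]], [[4, 5], [6, 7]])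

def Spec_multiplicaMatrizesContadorInstrucoes (matriz1 : List (List Int)) (matriz2 : List (List Int)) (out : Int) : Prop := out = multiplicaMatrizesContadorInstrucoes_alt matriz1 matriz2
instance (matriz1 : List (List Int)) (matriz2 : List (List Int)) (out : Int) : Decidable (Spec_multiplicaMatrizesContadorInstrucoes matriz1 matriz2 out) := by unfold Spec_multiplicaMatrizesContadorInstrucoes; infer_instance

-- ===== CLAIM (what is proved, stated in full; the proofs are below) =====
def Claim_equal_multiplicaMatrizesContadorInstrucoes : Prop := ∀ (matriz1 : List (List Int)) (matriz2 : List (List Int)), Dom_multiplicaMatrizesContadorInstrucoes matriz1 matriz2 → Pre_multiplicaMatrizesContadorInstrucoes matriz1 matriz2 → Spec_multiplicaMatrizesContadorInstrucoes matriz1 matriz2 (multiplicaMatrizesContadorInstrucoes matriz1 matriz2)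

-- ===== LEMMAS AND PROOFS =====

-- The inner loop adds 2 to the counter for each index it visits.
lemma pv_inner_count (row1 row2 : List Int) (l : List Int) (t : List Int × Int) :
    ((l.foldl (fun (t : List Int × Int) j =>
        let resultado := PySem.List.pyGetD row1 j 0 * PySem.List.pyGetD row2 j 0
        (t.1 ++ [resultado], t.2 + 1 + 1)) t).2) = t.2 + 2 * l.length := by
  induction l generalizing t with
  | nil => simp
  | cons x xs ih => simp [List.foldl, ih]; omega

-- The outer loop adds 2 + 2*len(matriz1[i]) per index i.
lemma pv_outer_count (matriz1 matriz2 : List (List Int)) (l : List Int) (s : List (List Int) × Int) :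
    ((l.foldl (fun (s : List (List Int) × Int) i =>
        let row1 := PySem.List.pyGetD matriz1 i []
        let row2 := PySem.List.pyGetD matriz2 i []
        let inner :=
          (PySem.List.pyRange 0 (row1.length : Int) 1).foldl
            (fun (t : List Int × Int) j =>
              let resultado := PySem.List.pyGetD row1 j 0 * PySem.List.pyGetD row2 j 0
              (t.1 ++ [resultado], t.2 + 1 + 1))
            ([], s.2 + 1)
        (s.1 ++ [inner.1], inner.2 + 1)) s).2)
      = s.2 + (l.map (fun i => 2 + 2 * ((PySem.List.pyGetD matriz1 i []).length : Int))).sum := by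
  induction l generalizing s with
  | nil => simp
  | cons x xs ih =>
    simp only [List.foldl, List.map, List.sum_cons]
    rw [ih, pv_inner_count]
    simp [PySem.List.length_pyRange_one]
    ring

-- ===== VERDICT (by name: the statement is the Claim_ definition above) =====
theorem multiplicaMatrizesContadorInstrucoes_spec : Claim_equal_multiplicaMatrizesContadorInstrucoes := by
  intro matriz1 matriz2 _ _
  unfold Spec_multiplicaMatrizesContadorInstrucoes
  unfold multiplicaMatrizesContadorInstrucoes multiplicaMatrizesContadorInstrucoes_alt
  rw [pv_outer_count]
  have h : (PySem.List.pyRange 0 (matriz1.length : Int) 1).map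
      (fun i => 2 + 2 * ((PySem.List.pyGetD matriz1 i ([] : List Int)).length : Int))
      = matriz1.map (fun row => 2 + 2 * (row.length : Int)) := by
    have := PySem.List.map_pyGetD_pyRange_zero' matriz1 ([] : List Int)
    calc (PySem.List.pyRange 0 (matriz1.length : Int) 1).map
          (fun i => 2 + 2 * ((PySem.List.pyGetD matriz1 i ([] : List Int)).length : Int))
        = ((PySem.List.pyRange 0 (matriz1.length : Int) 1).map
            (fun i => PySem.List.pyGetD matriz1 i ([] : List Int))).map
            (fun row => 2 + 2 * (row.length : Int)) := by rw [List.map_map]; rfl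
      _ = matriz1.map (fun row => 2 + 2 * (row.length : Int)) := by rw [this]
  rw [h]
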